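-- pv_equiv track=rewrite | github.com/bibash28/python_projects | pygmae/reflection.py | reflection_y
-- ===== SOURCE A (Python) =====
-- def reflection_y(x,y):
--  A = [[-1, 0, 0],
--        [0, 1, 0],
--        [0, 0, 1]]
--
--  B = [[x],
--       [y],
--       [1]]
--
--  result = [[0],
--            [0],
--            [0]]
--
--  # iterate through rows of A
--  for i in range(len(A)):
--    # iterate through columns of B
--    for j in range(len(B[0])):
--        # iterate through rows of B
--        for k in range(len(B)):
--            result[i][j] += A[i][k] * B[k][j]
--
--  return result[0][0],result[1][0]
-- ===== SOURCE B (Python) =====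
-- def reflection_y(x, y):
--     # Closed form of the y-axis reflection: no matrices, no loops.
--     return -x, y
-- ===== Notes on version B (the rewrite author's own statement) =====
-- stated objective: simpler
-- what changed: Replaced the 3x3 matrix construction and triple nested loop multiplication by the closed-form result (-x, y).
import Mathlib
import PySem

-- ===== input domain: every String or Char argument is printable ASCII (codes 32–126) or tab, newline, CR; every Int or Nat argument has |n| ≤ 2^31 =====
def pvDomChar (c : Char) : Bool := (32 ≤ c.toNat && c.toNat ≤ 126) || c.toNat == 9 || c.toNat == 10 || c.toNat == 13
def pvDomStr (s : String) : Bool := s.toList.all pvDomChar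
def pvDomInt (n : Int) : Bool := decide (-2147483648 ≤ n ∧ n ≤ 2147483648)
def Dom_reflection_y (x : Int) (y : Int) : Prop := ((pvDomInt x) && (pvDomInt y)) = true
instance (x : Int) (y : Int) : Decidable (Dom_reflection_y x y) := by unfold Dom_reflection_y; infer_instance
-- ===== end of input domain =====

-- B drops A's 3x3 matrix machinery and nested loops and returns the closed form (-x, y); objective: simpler.


-- ===== PORT A =====
-- result[i][j] += A[i][k] * B[k][j], transcribed with getD/set (all indices in range by construction)
def pvGet2 (m : List (List Int)) (i j : Nat) : Int := (m.getD i []).getD j 0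

def pvAdd2 (m : List (List Int)) (i j : Nat) (v : Int) : List (List Int) :=
  m.set i ((m.getD i []).set j ((m.getD i []).getD j 0 + v))

def reflection_y (x : Int) (y : Int) : Int × Int :=
  let A : List (List Int) := [[-1, 0, 0], [0, 1, 0], [0, 0, 1]]
  let B : List (List Int) := [[x], [y], [1]]
  let result : List (List Int) := [[0], [0], [0]]
  let result := (List.range A.length).foldl (fun result i =>
    (List.range (B.getD 0 []).length).foldl (fun result j =>
      (List.range B.length).foldl (fun result k =>
        pvAdd2 result i j (pvGet2 A i k * pvGet2 B k j)) result) result) result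
  (pvGet2 result 0 0, pvGet2 result 1 0)

-- ===== PORT B =====
def reflection_y_alt (x : Int) (y : Int) : Int × Int := (-x, y)

-- ===== PRECONDITION & SPEC =====
def Spec_reflection_y (x : Int) (y : Int) (out : Int × Int) : Prop := out = reflection_y_alt x y
instance (x : Int) (y : Int) (out : Int × Int) : Decidable (Spec_reflection_y x y out) := by unfold Spec_reflection_y; infer_instance

-- ===== CLAIM (what is proved, stated in full; the proofs are below) =====
def Claim_equal_reflection_y : Prop := ∀ (x : Int) (y : Int), Dom_reflection_y x y → Spec_reflection_y x y (reflection_y x y)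

-- ===== LEMMAS AND PROOFS =====

-- ===== VERDICT (by name: the statement is the Claim_ definition above) =====
theorem reflection_y_spec : Claim_equal_reflection_y := by
  intro x y _
  show reflection_y x y = reflection_y_alt x y
  simp [reflection_y, reflection_y_alt, pvGet2, pvAdd2, List.range_succ]
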